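-- pv_equiv track=rewrite | github.com/Yoon-men/CodingTest | BaekJoon/18115.py | joyGo
-- ===== SOURCE A (Python) =====
-- from typing import List
-- from collections import deque
--
-- def joyGo(N: int, skill_list: List[int]) -> str:
--     skill_list.reverse()
--     ans = deque()
--
--     for i in range(N):
--         if skill_list[i] == 1:
--             ans.appendleft(i+1)
--         elif skill_list[i] == 2:
--             ans.insert(1, i+1)
--         else:
--             ans.append(i+1)
--
--     return ' '.join(map(str, ans))
-- ===== SOURCE B (Python) =====
-- from typing import List
--
-- def joyGo(N: int, skill_list: List[int]) -> str:
--     # No deque at all: keep the current top card in a variable and the rest of the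
--     # pile as two plain stacks (front_rev, back) so every skill is an O(1) list
--     # append; a single reversal at the end rebuilds the order.
--     # Mutates skill_list in place like A (reverse).
--     skill_list.reverse()
--     top = None
--     front_rev = []   # cards just below the top, nearest LAST
--     back = []        # cards sent to the bottom, in bottom order
--     for i, s in zip(range(N), skill_list):
--         if top is None:
--             top = i + 1
--         elif s == 1:
--             front_rev.append(top)
--             top = i + 1
--         elif s == 2:
--             front_rev.append(i + 1)
--         else:
--             back.append(i + 1)
--     if top is None:
--         return ''
--     return ' '.join(map(str, [top] + front_rev[::-1] + back))
-- ===== Notes on version B (the rewrite author's own statement) =====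
-- stated objective: alternative
-- what changed: B drops the deque entirely: it tracks the top card in a variable and the rest as two plain append-only stacks (cards inserted just below the top, reversed, and cards sent to the bottom), iterating with zip instead of indexing, and rebuilds the order with one final reversal.
import Mathlib
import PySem

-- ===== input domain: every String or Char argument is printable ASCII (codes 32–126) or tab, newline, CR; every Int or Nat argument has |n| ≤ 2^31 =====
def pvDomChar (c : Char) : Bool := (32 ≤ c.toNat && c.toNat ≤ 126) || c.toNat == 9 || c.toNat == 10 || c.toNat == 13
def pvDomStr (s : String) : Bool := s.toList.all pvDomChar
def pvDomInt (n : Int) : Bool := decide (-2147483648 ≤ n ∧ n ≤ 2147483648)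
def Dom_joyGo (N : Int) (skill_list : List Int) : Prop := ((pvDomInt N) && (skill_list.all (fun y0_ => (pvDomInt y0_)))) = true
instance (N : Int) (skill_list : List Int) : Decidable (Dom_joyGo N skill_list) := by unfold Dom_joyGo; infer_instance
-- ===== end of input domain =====

-- B drops the deque: top card in a variable, the rest as two append-only stacks,
-- one final reversal.  Both A and B reverse skill_list in place; the equivalence
-- proved here is about the return value.

-- ===== PORT A =====
-- step of A's loop: ans is the deque (as a list, front first)
def joyGoStepA (s : List Int) (acc : Option (List Int)) (i : Int) : Option (List Int) :=
  match acc with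
  | none => none
  | some ans =>
    match PySem.List.pyGet? s i with
    | none => none                    -- skill_list[i] raises IndexError
    | some v =>
      if v = 1 then some ((i + 1) :: ans)
      else if v = 2 then some (PySem.List.insert ans 1 (i + 1))
      else some (ans ++ [i + 1])

def joyGo (N : Int) (skill_list : List Int) : String :=
  let s := skill_list.reverse
  match (PySem.List.pyRange 0 N 1).foldl (joyGoStepA s) (some []) with
  | none => ""                        -- unreachable under Pre_joyGo
  | some ans => PySem.Str.join " " (ans.map PySem.Int.toStr)

-- ===== PORT B =====
-- step of B's loop: state = (top, front_rev, back); each branch is a cheap append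
def joyGoStepB (st : Option Int × List Int × List Int) (p : Int × Int) :
    Option Int × List Int × List Int :=
  match st, p with
  | (none, frontRev, back), (i, _) => (some (i + 1), frontRev, back)
  | (some t, frontRev, back), (i, s) =>
    if s = 1 then (some (i + 1), frontRev ++ [t], back)
    else if s = 2 then (some t, frontRev ++ [i + 1], back)
    else (some t, frontRev, back ++ [i + 1])

def joyGo_alt (N : Int) (skill_list : List Int) : String :=
  let s := skill_list.reverse
  match ((PySem.List.pyRange 0 N 1).zip s).foldl joyGoStepB (none, [], []) with
  | (none, _, _) => ""
  | (some t, frontRev, back) =>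
      PySem.Str.join " " ((t :: (frontRev.reverse ++ back)).map PySem.Int.toStr)

-- ===== PRECONDITION & SPEC =====
-- A raises IndexError iff N exceeds the list's length; nothing else raises.
def Pre_joyGo (N : Int) (skill_list : List Int) : Prop := N ≤ (skill_list.length : Int)
instance (N : Int) (skill_list : List Int) : Decidable (Pre_joyGo N skill_list) := by
  unfold Pre_joyGo; infer_instance

def pvWitness_joyGo : Int × List Int := (3, [2, 1, 3])

def Spec_joyGo (N : Int) (skill_list : List Int) (out : String) : Prop := out = joyGo_alt N skill_list
instance (N : Int) (skill_list : List Int) (out : String) : Decidable (Spec_joyGo N skill_list out) := by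
  unfold Spec_joyGo; infer_instance

-- ===== CLAIM (what is proved, stated in full; the proofs are below) =====
def Claim_equal_joyGo : Prop := ∀ (N : Int) (skill_list : List Int), Dom_joyGo N skill_list → Pre_joyGo N skill_list → Spec_joyGo N skill_list (joyGo N skill_list)

-- ===== LEMMAS AND PROOFS =====

-- B's state rendered as A's deque
def joyGoRender : Option Int × List Int × List Int → List Int
  | (none, _, _) => []
  | (some t, frontRev, back) => t :: (frontRev.reverse ++ back)

-- invariant of B's state: before the first card is placed, both stacks are empty
def joyGoInv : Option Int × List Int × List Int → Prop
  | (none, frontRev, back) => frontRev = [] ∧ back = []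
  | (some _, _, _) => True

theorem joyGo_step_rel (s0 : List Int) (k : Nat) (hk : k < s0.length)
    (st : Option Int × List Int × List Int) (hInv : joyGoInv st) :
    joyGoStepA s0 (some (joyGoRender st)) (k : Int)
      = some (joyGoRender (joyGoStepB st ((k : Int), s0[k])))
    ∧ joyGoInv (joyGoStepB st ((k : Int), s0[k])) := by
  have hg : PySem.List.pyGet? s0 (k : Int) = some s0[k] := by
    simp [PySem.List.pyGet?_natCast, List.getElem?_eq_getElem hk]
  match st with
  | (none, frontRev, back) =>
    obtain ⟨hf, hb⟩ := hInv
    subst hf; subst hb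
    by_cases h1 : s0[k] = 1 <;> by_cases h2 : s0[k] = 2 <;>
      simp [joyGoStepA, joyGoStepB, joyGoRender, joyGoInv, hg, h1, h2, PySem.List.insert]
  | (some t, frontRev, back) =>
    by_cases h1 : s0[k] = 1 <;> by_cases h2 : s0[k] = 2 <;>
      simp [joyGoStepA, joyGoStepB, joyGoRender, joyGoInv, hg, h1, h2,
        PySem.List.insert_ofNat (t :: (frontRev.reverse ++ back)) 1 ((k : Int) + 1) (by simp)]

theorem joyGo_main (s0 : List Int) (n : Nat) : ∀ (k : Nat), k + n ≤ s0.length →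
    ∀ (st : Option Int × List Int × List Int), joyGoInv st →
    (PySem.List.pyRange (k : Int) ((k : Int) + (n : Int)) 1).foldl (joyGoStepA s0)
        (some (joyGoRender st))
      = some (joyGoRender
          (((PySem.List.pyRange (k : Int) ((k : Int) + (n : Int)) 1).zip (s0.drop k)).foldl
            joyGoStepB st))
    ∧ joyGoInv
        (((PySem.List.pyRange (k : Int) ((k : Int) + (n : Int)) 1).zip (s0.drop k)).foldl
          joyGoStepB st) := by
  induction n with
  | zero =>
    intro k _ st hInv
    rw [show (k : Int) + (0 : Nat) = (k : Int) by push_cast; ring,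
      PySem.List.pyRange_one_eq_nil (le_refl _)]
    exact ⟨rfl, hInv⟩
  | succ n ih =>
    intro k hk st hInv
    have hklt : k < s0.length := by omega
    have hcons : PySem.List.pyRange (k : Int) ((k : Int) + ((n + 1 : Nat) : Int)) 1
        = (k : Int) :: PySem.List.pyRange ((k : Int) + 1) ((k : Int) + ((n + 1 : Nat) : Int)) 1 :=
      PySem.List.pyRange_one_cons (by push_cast; omega)
    have hdrop : s0.drop k = s0[k] :: s0.drop (k + 1) := List.drop_eq_getElem_cons hklt
    have hstep := joyGo_step_rel s0 k hklt st hInv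
    have hcast1 : (k : Int) + 1 = ((k + 1 : Nat) : Int) := by push_cast; ring
    have hcast2 : (k : Int) + ((n + 1 : Nat) : Int) = ((k + 1 : Nat) : Int) + (n : Int) := by
      push_cast; ring
    rw [hcons, hdrop]
    simp only [List.zip_cons_cons, List.foldl_cons]
    rw [hstep.1, hcast1, hcast2]
    exact ih (k + 1) (by omega) _ hstep.2

-- ===== VERDICT (by name: the statement is the Claim_ definition above) =====
theorem joyGo_spec : Claim_equal_joyGo := by
  intro N skill_list _ hPre
  unfold Pre_joyGo at hPre
  unfold Spec_joyGo joyGo joyGo_alt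
  by_cases hN : N ≤ 0
  · rw [PySem.List.pyRange_one_eq_nil hN]
    simp [PySem.Str.join, PySem.Chars.join, List.intercalate]
  · have h0 : (0 : Int) ≤ N := by omega
    have hNlen : N.toNat ≤ skill_list.reverse.length := by
      simp only [List.length_reverse]; omega
    have h := joyGo_main skill_list.reverse N.toNat 0 (by omega) (none, [], []) ⟨rfl, rfl⟩
    rw [show ((0 : Nat) : Int) + (N.toNat : Int) = N by omega] at h
    rw [show ((0 : Nat) : Int) = (0 : Int) from rfl, List.drop_zero] at h
    rw [show joyGoRender (none, [], []) = [] from rfl] at h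
    simp only [h.1]
    cases hB : ((PySem.List.pyRange 0 N 1).zip skill_list.reverse).foldl joyGoStepB (none, [], []) with
    | mk top rest =>
      match top, rest with
      | none, (frontRev, back) =>
        simp [joyGoRender, PySem.Str.join, PySem.Chars.join, List.intercalate]
      | some t, (frontRev, back) =>
        simp [joyGoRender]
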